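-- pv_equiv track=rewrite | github.com/raeez/chiral-bar-cobar | compute/lib/analytic_langlands_shadow_engine.py | ff_center_dimension
-- ===== SOURCE A (Python) =====
-- def ff_center_dimension(lie_type: str, N: int, weight: int) -> int:
--     r"""Dimension of the graded piece of the Feigin-Frenkel center
--     Z(V_crit(g)) at a given weight.
--
--     For sl_N: Z(V_crit(sl_N)) = C[S_{-d_1}, S_{-d_2}, ...] where
--     d_i = 2, 3, ..., N are the Casimir degrees.
--
--     The dimension at weight n is the number of partitions of n into
--     parts from {d_1, ..., d_{N-1}} = {2, 3, ..., N}.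
--
--     For sl_2: Z = C[S_{-2}], so dim(weight n) = 1 if n even, 0 if n odd.
--               More precisely: number of partitions of n into parts of size 2.
--               dim = floor(n/2) + 1 ... no, dim of WEIGHT n piece of C[S_{-2}]
--               is 1 if 2 | n, 0 otherwise (since S_{-2} has weight 2 and the
--               polynomial ring in one variable has dim 1 at each degree).
--               CORRECTION: C[S_{-2}] = C + C*S_{-2} + C*S_{-2}^2 + ...
--               S_{-2}^m has weight 2m. So dim(weight n) = 1 if n even, 0 if odd.
--
--     For sl_3: Z = C[S_{-2}, S_{-3}], generators of weights 2 and 3.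
--               dim(weight n) = number of partitions of n into parts from {2,3}.
--     """
--     if lie_type == 'sl':
--         casimir_degrees = list(range(2, N + 1))
--     else:
--         raise ValueError(f"Only sl_N implemented, got {lie_type}")
--
--     # Count partitions of `weight` into parts from casimir_degrees
--     # using dynamic programming
--     dp = [0] * (weight + 1)
--     dp[0] = 1
--     for d in casimir_degrees:
--         for w in range(d, weight + 1):
--             dp[w] += dp[w - d]
--     return dp[weight]
-- ===== SOURCE B (Python) =====
-- def ff_center_dimension(lie_type: str, N: int, weight: int) -> int:
--     """Top-down memoized evaluation of the partition recurrence
--     count(i, rem) = count(i+1, rem) + count(i, rem - parts[i]),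
--     run with an explicit stack (so deep chains do not hit the
--     interpreter's recursion limit)."""
--     if lie_type == 'sl':
--         parts = list(range(2, N + 1))
--     else:
--         raise ValueError(f"Only sl_N implemented, got {lie_type}")
--     n = len(parts)
--     memo = {}
--     stack = [(0, weight)]
--     while stack:
--         i, rem = stack[-1]
--         if (i, rem) in memo:
--             stack.pop()
--             continue
--         if rem == 0:
--             memo[(i, rem)] = 1
--             stack.pop()
--             continue
--         if i == n:
--             memo[(i, rem)] = 0
--             stack.pop()
--             continue
--         d = parts[i]
--         deps = [(i + 1, rem)]
--         if 0 < d <= rem: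
--             deps.append((i, rem - d))
--         missing = [k for k in deps if k not in memo]
--         if missing:
--             stack.extend(missing)
--             continue
--         memo[(i, rem)] = memo[(i + 1, rem)] + (memo[(i, rem - d)] if 0 < d <= rem else 0)
--         stack.pop()
--     return memo[(0, weight)]
-- ===== Notes on version B (the rewrite author's own statement) =====
-- stated objective: alternative
-- what changed: Replaces the bottom-up in-place dp array (outer loop over parts, inner loop over weights) by a top-down memoized evaluation of the recurrence count(i, rem) = count(i+1, rem) + count(i, rem - parts[i]), driven by an explicit stack; only states reachable from (0, weight) are computed.
import Mathlib
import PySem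

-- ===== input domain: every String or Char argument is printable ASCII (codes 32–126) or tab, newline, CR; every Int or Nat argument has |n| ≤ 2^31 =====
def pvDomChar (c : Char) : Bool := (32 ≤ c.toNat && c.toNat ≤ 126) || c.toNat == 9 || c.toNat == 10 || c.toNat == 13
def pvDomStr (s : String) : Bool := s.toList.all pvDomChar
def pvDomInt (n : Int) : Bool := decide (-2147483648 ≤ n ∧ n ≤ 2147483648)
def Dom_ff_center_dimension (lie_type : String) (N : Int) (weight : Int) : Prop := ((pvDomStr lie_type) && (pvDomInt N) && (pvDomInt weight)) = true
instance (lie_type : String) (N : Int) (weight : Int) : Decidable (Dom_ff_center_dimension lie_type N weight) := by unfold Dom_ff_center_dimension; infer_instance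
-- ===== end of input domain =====

-- B replaces A's bottom-up dp array by a top-down memoized evaluation of the partition
-- recurrence count(i, rem) = count(i+1, rem) + count(i, rem - parts[i]) (objective: alternative).
-- Source B runs this recurrence with an explicit memo stack; the port below writes the same
-- recurrence as structural recursion (memoisation does not change the computed value).

-- ===== PORT A =====
-- inner loop: 'for w in range(d, weight + 1): dp[w] += dp[w - d]'.
-- The Python list dp is a fixed-size array mutated by index, so it is ported as Array;
-- every index used is in range under Pre_ (0 ≤ weight), where the port is exact.
def aInner (weight : Int) (dp : Array Int) (d : Int) : Array Int :=
  (PySem.List.pyRange d (weight + 1) 1).foldl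
    (fun dp w => dp.setIfInBounds w.toNat (dp.getD w.toNat 0 + dp.getD (w - d).toNat 0)) dp

-- casimir_degrees = list(range(2, N + 1)); dp = [0] * (weight + 1); dp[0] = 1
-- (dp[0] = 1 raises IndexError when weight < 0: outside Pre_); the two loops; return dp[weight]
def ff_center_dimension (lie_type : String) (N : Int) (weight : Int) : Int :=
  if lie_type = "sl" then
    ((PySem.List.pyRange 2 (N + 1) 1).foldl (aInner weight)
        ((Array.replicate (weight + 1).toNat (0:Int)).setIfInBounds 0 1)).getD weight.toNat 0
  else 0  -- raise ValueError: outside Pre_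

-- ===== PORT B =====
-- count(i, rem) of Source B with its memo: Source B evaluates the recurrence
-- count(i, rem) = count(i+1, rem) + count(i, rem - d) memoised, driving it with an
-- explicit stack (post-order evaluation); the port threads the same memo — keyed by
-- the parts suffix parts[i:], which is what the index i of Source B's key (i, rem)
-- denotes — through the recursion that the stack realises. Values are identical.
def countMemo : List Int → Int → Std.HashMap (List Int × Int) Int →
    Int × Std.HashMap (List Int × Int) Int
  | parts, rem, memo =>
    match memo[(parts, rem)]? with
    | some v => (v, memo)
    | none =>
      if rem = 0 then
        (1, memo.insert (parts, rem) 1)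
      else
        match parts with
        | [] => (0, memo.insert (parts, rem) 0)
        | d :: rest =>
          let r1 := countMemo rest rem memo
          if _h : 0 < d ∧ d ≤ rem then
            let r2 := countMemo (d :: rest) (rem - d) r1.2
            (r1.1 + r2.1, r2.2.insert (d :: rest, rem) (r1.1 + r2.1))
          else
            (r1.1, r1.2.insert (d :: rest, rem) r1.1)
termination_by parts rem _ => (rem.toNat, parts.length)
decreasing_by
  all_goals first
    | exact Prod.Lex.right _ (by simp)
    | exact Prod.Lex.left _ _ (by omega)

def ff_center_dimension_alt (lie_type : String) (N : Int) (weight : Int) : Int :=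
  if lie_type = "sl" then
    (countMemo (PySem.List.pyRange 2 (N + 1) 1) weight ∅).1
  else 0  -- raise ValueError: outside Pre_

-- ===== PRECONDITION & SPEC =====
-- Pre_ excludes exactly the inputs on which A raises: lie_type ≠ "sl" (ValueError)
-- and weight < 0 (IndexError: dp = [0]*(weight+1) is empty, dp[0] = 1 fails).
def Pre_ff_center_dimension (lie_type : String) (N : Int) (weight : Int) : Prop :=
  lie_type = "sl" ∧ 0 ≤ weight
instance (lie_type : String) (N : Int) (weight : Int) : Decidable (Pre_ff_center_dimension lie_type N weight) := by unfold Pre_ff_center_dimension; infer_instance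

def pvWitness_ff_center_dimension : String × Int × Int := ("sl", 3, 4)

def Spec_ff_center_dimension (lie_type : String) (N : Int) (weight : Int) (out : Int) : Prop := out = ff_center_dimension_alt lie_type N weight
instance (lie_type : String) (N : Int) (weight : Int) (out : Int) : Decidable (Spec_ff_center_dimension lie_type N weight out) := by unfold Spec_ff_center_dimension; infer_instance

-- ===== CLAIM (what is proved, stated in full; the proofs are below) =====
def Claim_equal_ff_center_dimension : Prop := ∀ (lie_type : String) (N : Int) (weight : Int), Dom_ff_center_dimension lie_type N weight → Pre_ff_center_dimension lie_type N weight → Spec_ff_center_dimension lie_type N weight (ff_center_dimension lie_type N weight)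


-- ===== LEMMAS AND PROOFS =====

-- the memoised recurrence, without the memo: the specification countMemo computes.
def countParts (parts : List Int) (rem : Int) : Int :=
  if rem = 0 then 1
  else match parts with
    | [] => 0
    | d :: rest =>
      countParts rest rem +
        (if _h : 0 < d ∧ d ≤ rem then countParts (d :: rest) (rem - d) else 0)
termination_by (rem.toNat, parts.length)
decreasing_by
  all_goals first
    | exact Prod.Lex.right _ (by simp)
    | exact Prod.Lex.left _ _ (by omega)


-- the List-level image of A's inner loop (dp.toList of the Array computation).
def aInnerL (weight : Int) (dp : List Int) (d : Int) : List Int :=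
  (PySem.List.pyRange d (weight + 1) 1).foldl
    (fun dp w =>
      PySem.List.pySetD dp w (PySem.List.pyGetD dp w 0 + PySem.List.pyGetD dp (w - d) 0)) dp


-- geo d f w = f w + f (w-d) + f (w-2d) + …  : the effect of A's inner loop on one cell.
def geo (d : Nat) (f : Nat → Int) (w : Nat) : Int :=
  f w + if 0 < d ∧ d ≤ w then geo d f (w - d) else 0
termination_by w
decreasing_by omega

lemma geo_eq (d : Nat) (f : Nat → Int) (w : Nat) :
    geo d f w = f w + if 0 < d ∧ d ≤ w then geo d f (w - d) else 0 := by
  rw [geo]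

lemma geo_congr (d : Nat) (f g : Nat → Int) :
    ∀ w, (∀ j ≤ w, f j = g j) → geo d f w = geo d g w := by
  intro w
  induction w using Nat.strong_induction_on with
  | _ w ih =>
    intro h
    rw [geo_eq d f w, geo_eq d g w, h w le_rfl]
    split_ifs with hc
    · rw [ih (w - d) (by omega) (fun j hj => h j (by omega))]
    · rfl

lemma geo_comm (a b : Nat) (f : Nat → Int) :
    ∀ w, geo a (geo b f) w = geo b (geo a f) w := by
  intro w
  induction w using Nat.strong_induction_on with
  | _ w ih =>
    rw [geo_eq a (geo b f) w, geo_eq b (geo a f) w]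
    by_cases ha : 0 < a ∧ a ≤ w
    · by_cases hb : 0 < b ∧ b ≤ w
      · rw [if_pos ha, if_pos hb, ih (w - a) (by omega), ← ih (w - b) (by omega),
            geo_eq b (geo a f) (w - a), geo_eq a (geo b f) (w - b),
            geo_eq b f w, geo_eq a f w, if_pos ha, if_pos hb]
        rw [show w - b - a = w - a - b from by omega, ih (w - a - b) (by omega)]
        by_cases hab : 0 < b ∧ b ≤ w - a
        · rw [if_pos hab, if_pos (show 0 < a ∧ a ≤ w - b from by omega)]; ring
        · rw [if_neg hab, if_neg (show ¬(0 < a ∧ a ≤ w - b) from by omega)]; ring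
      · rw [if_pos ha, if_neg hb, ih (w - a) (by omega), geo_eq b (geo a f) (w - a),
            geo_eq b f w, geo_eq a f w, if_pos ha, if_neg hb,
            if_neg (show ¬(0 < b ∧ b ≤ w - a) from by omega)]
        ring
    · by_cases hb : 0 < b ∧ b ≤ w
      · rw [if_neg ha, if_pos hb, ← ih (w - b) (by omega), geo_eq a (geo b f) (w - b),
            geo_eq b f w, geo_eq a f w, if_neg ha, if_pos hb,
            if_neg (show ¬(0 < a ∧ a ≤ w - b) from by omega)]
        ring
      · rw [if_neg ha, if_neg hb, geo_eq b f w, geo_eq a f w, if_neg ha, if_neg hb]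

-- applyAll [d₁,…,dₖ] f = geo dₖ (… (geo d₁ f)) : A's outer loop, as an operator on cell functions.
def applyAll : List Int → (Nat → Int) → Nat → Int
  | [], f, w => f w
  | d :: ds, f, w => applyAll ds (geo d.toNat f) w

lemma applyAll_congr : ∀ (ds : List Int) (f g : Nat → Int) (w : Nat),
    (∀ j ≤ w, f j = g j) → applyAll ds f w = applyAll ds g w
  | [], _, _, w, h => h w le_rfl
  | d :: ds, f, g, w, h =>
    applyAll_congr ds _ _ w
      (fun j hj => geo_congr d.toNat f g j (fun k hk => h k (le_trans hk hj)))

lemma applyAll_geo : ∀ (ds : List Int) (e : Nat) (f : Nat → Int) (w : Nat),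
    applyAll ds (geo e f) w = geo e (applyAll ds f) w
  | [], _, _, _ => rfl
  | d :: ds, e, f, w => by
    show applyAll ds (geo d.toNat (geo e f)) w = geo e (applyAll (d :: ds) f) w
    rw [applyAll_congr ds _ (geo e (geo d.toNat f)) w (fun j _ => geo_comm d.toNat e f j)]
    exact applyAll_geo ds e (geo d.toNat f) w

lemma applyAll_zero : ∀ (ds : List Int) (f : Nat → Int), applyAll ds f 0 = f 0
  | [], _ => rfl
  | d :: ds, f => by
    show applyAll ds (geo d.toNat f) 0 = f 0
    rw [applyAll_zero ds, geo_eq, if_neg (by omega)]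
    ring

def delta0 : Nat → Int := fun w => if w = 0 then 1 else 0

lemma countParts_zero (ds : List Int) : countParts ds 0 = 1 := by
  rw [countParts.eq_def]
  simp

lemma countParts_cons (d : Int) (ds : List Int) (rem : Int) (h : rem ≠ 0) :
    countParts (d :: ds) rem =
      countParts ds rem + (if 0 < d ∧ d ≤ rem then countParts (d :: ds) (rem - d) else 0) := by
  rw [countParts.eq_def, if_neg h]
  simp only [dite_eq_ite]

lemma countParts_nil (rem : Int) (h : rem ≠ 0) : countParts [] rem = 0 := by
  rw [countParts.eq_def, if_neg h]

-- B's recurrence computes applyAll at the corresponding Nat index.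
lemma countParts_eq (n : Nat) : ∀ (ds : List Int) (rem : Int), 0 ≤ rem → rem.toNat = n →
    countParts ds rem = applyAll ds delta0 n := by
  induction n using Nat.strong_induction_on with
  | _ n ih =>
    intro ds rem h0 hn
    induction ds with
    | nil =>
      rcases eq_or_ne rem 0 with hz | hz
      · rw [hz, countParts_zero]
        show (1 : Int) = delta0 n
        rw [show n = 0 from by omega]
        rfl
      · rw [countParts_nil _ hz]
        show (0 : Int) = delta0 n
        unfold delta0
        rw [if_neg (by omega)]
    | cons d rest ihds =>
      rcases eq_or_ne rem 0 with hz | hz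
      · rw [hz, countParts_zero, show n = 0 from by omega, applyAll_zero]
        rfl
      · rw [countParts_cons _ _ _ hz,
            show applyAll (d :: rest) delta0 n = geo d.toNat (applyAll rest delta0) n from
              applyAll_geo rest d.toNat delta0 n,
            geo_eq d.toNat (applyAll rest delta0) n, ← ihds]
        by_cases hd : 0 < d ∧ d ≤ rem
        · rw [if_pos hd, if_pos (show 0 < d.toNat ∧ d.toNat ≤ n from by omega),
              ih (n - d.toNat) (by omega) (d :: rest) (rem - d) (by omega) (by omega),
              show applyAll (d :: rest) delta0 (n - d.toNat) =
                  geo d.toNat (applyAll rest delta0) (n - d.toNat) from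
                applyAll_geo rest d.toNat delta0 (n - d.toNat)]
        · rw [if_neg hd, if_neg (show ¬(0 < d.toNat ∧ d.toNat ≤ n) from by omega)]

lemma getD_set_eq (l : List Int) (t i : Nat) (v : Int) (ht : t < l.length) :
    (l.set t v).getD i 0 = if i = t then v else l.getD i 0 := by
  by_cases h : i = t
  · subst h
    simp [List.getD_eq_getElem?_getD, ht]
  · simp [List.getD_eq_getElem?_getD, h, Ne.symm h]

-- A's inner loop over range(d, d+k) : cells below d+k hold geo, cells above are untouched.
lemma inner_fold (d W : Int) (hd : 0 < d) (dp : List Int) (hlen : (dp.length : Int) = W + 1) :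
    ∀ k : Nat, d + k ≤ W + 1 →
      ((PySem.List.pyRange d (d + k) 1).foldl
          (fun dp w =>
            PySem.List.pySetD dp w (PySem.List.pyGetD dp w 0 + PySem.List.pyGetD dp (w - d) 0)) dp).length
        = dp.length ∧
      ∀ i : Nat, i < dp.length →
        ((PySem.List.pyRange d (d + k) 1).foldl
            (fun dp w =>
              PySem.List.pySetD dp w (PySem.List.pyGetD dp w 0 + PySem.List.pyGetD dp (w - d) 0)) dp).getD i 0
          = if (i : Int) < d + k then geo d.toNat (fun j => dp.getD j 0) i else dp.getD i 0 := by
  intro k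
  induction k with
  | zero =>
    intro _
    rw [show d + ((0:Nat):Int) = d from by push_cast; ring, PySem.List.pyRange_one_eq_nil le_rfl]
    refine ⟨rfl, fun i hi => ?_⟩
    by_cases hc : (i : Int) < d
    · rw [List.foldl_nil, if_pos hc, geo_eq, if_neg (by omega)]
      simp
    · rw [List.foldl_nil, if_neg hc]
  | succ k ihk =>
    intro hk
    have hk' : d + (k : Int) ≤ W + 1 := by push_cast at hk ⊢; omega
    obtain ⟨ihlen, ihval⟩ := ihk hk'
    have hcast : d + ((k + 1 : Nat) : Int) = (d + (k : Nat)) + 1 := by push_cast; ring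
    rw [hcast, PySem.List.pyRange_one_succ_right (by omega), List.foldl_append,
        List.foldl_cons, List.foldl_nil]
    have ht : d + (k : Int) = ((d + (k : Int)).toNat : Int) := by omega
    have hk2 : d + (k : Int) - d = ((k : Nat) : Int) := by omega
    have htlen : (d + (k : Int)).toNat < dp.length := by omega
    have hklen : k < dp.length := by omega
    rw [hk2]
    set F := (PySem.List.pyRange d (d + (k:Nat))).foldl (fun dp w => PySem.List.pySetD dp w (PySem.List.pyGetD dp w 0 + PySem.List.pyGetD dp (w - d) 0)) dp with hF
    rw [ht, PySem.List.pySetD_natCast, PySem.List.pyGetD_natCast, PySem.List.pyGetD_natCast,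
        ihval _ htlen, if_neg (by omega), ihval k hklen, if_pos (by omega)]
    refine ⟨by rw [List.length_set]; exact ihlen, fun i hi => ?_⟩
    rw [getD_set_eq _ _ _ _ (by rw [ihlen]; exact htlen)]
    by_cases hit : i = (d + (k : Int)).toNat
    · subst hit
      rw [if_pos rfl, if_pos (by omega),
          geo_eq d.toNat (fun j => dp.getD j 0) ((d + (k : Int)).toNat),
          if_pos (by omega), show (d + (k : Int)).toNat - d.toNat = k from by omega]
    · rw [if_neg hit, ihval i hi]
      by_cases hlt : (i : Int) < d + (k : Int)
      · rw [if_pos hlt, if_pos (by omega)]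
      · rw [if_neg hlt, if_neg (by omega)]

-- the full inner loop (range(d, weight+1)) turns every cell into geo.
lemma aInner_spec (d W : Int) (hd : 0 < d) (dp : List Int)
    (hlen : (dp.length : Int) = W + 1) :
    (aInnerL W dp d).length = dp.length ∧
    ∀ i : Nat, i < dp.length → (aInnerL W dp d).getD i 0 = geo d.toNat (fun j => dp.getD j 0) i := by
  unfold aInnerL
  by_cases hle : d ≤ W + 1
  · have h := inner_fold d W hd dp hlen (W + 1 - d).toNat (by omega)
    rw [show d + ((W + 1 - d).toNat : Int) = W + 1 from by omega] at h
    obtain ⟨h1, h2⟩ := h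
    refine ⟨h1, fun i hi => ?_⟩
    rw [h2 i hi, if_pos (by omega)]
  · rw [PySem.List.pyRange_one_eq_nil (by omega)]
    refine ⟨rfl, fun i hi => ?_⟩
    rw [List.foldl_nil, geo_eq, if_neg (by omega)]
    simp

-- A's outer loop computes applyAll.
lemma outer_fold (W : Int) :
    ∀ (ds : List Int) (dp : List Int), (∀ d ∈ ds, 0 < d) → (dp.length : Int) = W + 1 →
      ((ds.foldl (aInnerL W) dp).length = dp.length ∧
       ∀ i : Nat, i < dp.length →
         (ds.foldl (aInnerL W) dp).getD i 0 = applyAll ds (fun j => dp.getD j 0) i) := by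
  intro ds
  induction ds with
  | nil => exact fun dp _ _ => ⟨rfl, fun i _ => rfl⟩
  | cons d rest ih =>
    intro dp hpos hlen
    have hd : 0 < d := hpos d (by simp)
    obtain ⟨h1, h2⟩ := aInner_spec d W hd dp hlen
    obtain ⟨h3, h4⟩ := ih (aInnerL W dp d) (fun e he => hpos e (by simp [he]))
      (by rw [h1]; exact hlen)
    refine ⟨by rw [List.foldl_cons, h3, h1], fun i hi => ?_⟩
    rw [List.foldl_cons, h4 i (by omega)]
    exact applyAll_congr rest _ _ i (fun j hj => h2 j (by omega))


-- every value cached in the memo is correct.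
def MemoInv (memo : Std.HashMap (List Int × Int) Int) : Prop :=
  ∀ (ps : List Int) (r v : Int), memo[(ps, r)]? = some v → v = countParts ps r

lemma memoInv_insert (memo : Std.HashMap (List Int × Int) Int) (ps : List Int) (r v : Int)
    (hInv : MemoInv memo) (hv : v = countParts ps r) : MemoInv (memo.insert (ps, r) v) := by
  intro ps' r' v' h
  rw [Std.HashMap.getElem?_insert] at h
  simp only [beq_iff_eq] at h
  split at h
  · next he =>
    injection he with h1 h2
    subst h1
    subst h2
    injection h with h3
    subst h3
    exact hv
  · exact hInv ps' r' v' h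

lemma countMemo_spec : ∀ (parts : List Int) (rem : Int) (memo : Std.HashMap (List Int × Int) Int),
    MemoInv memo →
    (countMemo parts rem memo).1 = countParts parts rem ∧ MemoInv (countMemo parts rem memo).2 := by
  intro parts rem memo
  induction parts, rem, memo using countMemo.induct with
  | case1 parts rem memo v hm =>
    intro hInv
    rw [countMemo.eq_def]
    simp only [hm]
    exact ⟨hInv parts rem v hm, hInv⟩
  | case2 parts memo hm =>
    intro hInv
    rw [countMemo.eq_def]
    simp only [hm]
    exact ⟨(countParts_zero parts).symm, memoInv_insert memo parts 0 1 hInv (countParts_zero parts).symm⟩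
  | case3 rem memo hz hm =>
    intro hInv
    rw [countMemo.eq_def]
    simp only [hm, if_neg hz]
    exact ⟨(countParts_nil rem hz).symm, memoInv_insert memo [] rem 0 hInv (countParts_nil rem hz).symm⟩
  | case4 rem memo hz d rest r1 hd hm ih1 ih2 =>
    intro hInv
    obtain ⟨hv1, hI1⟩ := ih1 hInv
    obtain ⟨hv2, hI2⟩ := ih2 hI1
    have hval : (countMemo rest rem memo).1
        + (countMemo (d :: rest) (rem - d) (countMemo rest rem memo).2).1
        = countParts (d :: rest) rem := by
      rw [hv1, hv2, countParts_cons d rest rem hz, if_pos hd]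
    rw [countMemo.eq_def]
    simp only [hm, if_neg hz, dif_pos hd]
    exact ⟨hval, memoInv_insert _ _ _ _ hI2 hval⟩
  | case5 rem memo hz d rest hd hm ih1 =>
    intro hInv
    obtain ⟨hv1, hI1⟩ := ih1 hInv
    have hval : (countMemo rest rem memo).1 = countParts (d :: rest) rem := by
      rw [hv1, countParts_cons d rest rem hz, if_neg hd, add_zero]
    rw [countMemo.eq_def]
    simp only [hm, if_neg hz, dif_neg hd]
    exact ⟨hval, memoInv_insert _ _ _ _ hI1 hval⟩

lemma memoInv_empty : MemoInv (∅ : Std.HashMap (List Int × Int) Int) := by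
  intro ps r v h
  rw [Std.HashMap.getElem?_empty] at h
  cases h

lemma arr_getD (a : Array Int) (i : Nat) : a.getD i 0 = a.toList.getD i 0 := by
  rw [Array.getD_eq_getD_getElem?, List.getD_eq_getElem?_getD, Array.getElem?_toList]

lemma foldl_toList_congr (l : List Int) (f : Array Int → Int → Array Int)
    (g : List Int → Int → List Int)
    (h : ∀ a x, x ∈ l → (f a x).toList = g a.toList x) :
    ∀ a : Array Int, (l.foldl f a).toList = l.foldl g a.toList := by
  induction l with
  | nil => intro a; rfl
  | cons x xs ih =>
    intro a
    rw [List.foldl_cons, List.foldl_cons, ih (fun a y hy => h a y (by simp [hy])) (f a x),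
        h a x (by simp)]

lemma aInner_toList (W : Int) (dp : Array Int) (d : Int) (hd : 0 ≤ d) :
    (aInner W dp d).toList = aInnerL W dp.toList d := by
  unfold aInner aInnerL
  refine foldl_toList_congr _ _ _ (fun a w hw => ?_) dp
  have hdw : d ≤ w := (PySem.List.mem_pyRange_one.mp hw).1
  rw [Array.toList_setIfInBounds, arr_getD, arr_getD,
      PySem.List.pySetD_of_nonneg _ _ (by omega), PySem.List.pyGetD_of_nonneg _ 0 (by omega),
      PySem.List.pyGetD_of_nonneg _ 0 (by omega)]

-- ===== VERDICT (by name: the statement is the Claim_ definition above) =====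
theorem ff_center_dimension_spec : Claim_equal_ff_center_dimension := by
  intro lie_type N weight _ hpre
  obtain ⟨hl, hw⟩ := hpre
  subst hl
  unfold Spec_ff_center_dimension ff_center_dimension ff_center_dimension_alt
  rw [if_pos rfl, if_pos rfl]
  rw [arr_getD,
      foldl_toList_congr _ _ (aInnerL weight)
        (fun a d hd => aInner_toList weight a d
          (by have := (PySem.List.mem_pyRange_one.mp hd).1; omega)) _,
      Array.toList_setIfInBounds, Array.toList_replicate]
  have hlen : ((((List.replicate (weight + 1).toNat (0:Int)).set 0 1).length : Nat) : Int)
      = weight + 1 := by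
    rw [List.length_set, List.length_replicate]; omega
  have hf0 : ∀ j : Nat, ((List.replicate (weight + 1).toNat (0:Int)).set 0 1).getD j 0 = delta0 j := by
    intro j
    rw [getD_set_eq _ _ _ _ (by rw [List.length_replicate]; omega)]
    by_cases hj : j = 0
    · subst hj; rfl
    · rw [if_neg hj]
      unfold delta0
      rw [if_neg hj]
      simp [List.getD_eq_getElem?_getD, List.getElem?_replicate]
      split_ifs <;> rfl
  have hpos : ∀ d ∈ PySem.List.pyRange 2 (N + 1) 1, 0 < d := by
    intro d hdm
    have := (PySem.List.mem_pyRange_one.mp hdm).1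
    omega
  obtain ⟨h1, h2⟩ := outer_fold weight (PySem.List.pyRange 2 (N + 1) 1)
    ((List.replicate (weight + 1).toNat (0:Int)).set 0 1) hpos hlen
  rw [h2 weight.toNat (by omega),
      applyAll_congr _ _ delta0 weight.toNat (fun j _ => hf0 j),
      ← countParts_eq weight.toNat (PySem.List.pyRange 2 (N + 1) 1) weight hw rfl,
      (countMemo_spec (PySem.List.pyRange 2 (N + 1) 1) weight ∅ memoInv_empty).1]
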